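-- pv_equiv track=rewrite | github.com/shaahmeer/Pythonhomework2 | Python2-Semester-4-main/Python2-Semester-4-main/13.3. A272727.py | the_sequence
-- ===== SOURCE A (Python) =====
-- def  the_sequence( n ):
--     seq = [ 0 ]
--     while len( seq ) < n:
--         rev_seq = seq[ : : -1 ]
--         new_number = 0
--         for i in range( len( seq ) ):
--             new_number += ( seq[i] == rev_seq[i] )
--         seq.append( new_number )
--     return seq
-- ===== SOURCE B (Python) =====
-- def the_sequence(n):
--     # Parity shortcut: the sequence keeps zero at even positions and a positive
--     # value at odd positions, so an even-length prefix has no symmetric match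
--     # (opposite parities never agree) and for odd length L all (L+1)//2 even
--     # positions match automatically; only the L//2 odd symmetric pairs are compared.
--     seq = [0]
--     for _ in range(n - 1):
--         L = len(seq)
--         if L % 2 == 0:
--             seq.append(0)
--         else:
--             c = 0
--             for k in range(L // 2):
--                 c += seq[2 * k + 1] == seq[L - 2 - 2 * k]
--             seq.append((L + 1) // 2 + c)
--     return seq
-- ===== Notes on version B (the rewrite author's own statement) =====
-- stated objective: alternative
-- what changed: B exploits an invariant of the sequence (zeros at even positions, positive values at odd positions): for an even-length prefix it appends a zero outright, and for an odd-length prefix it starts from the automatic even-position matches and compares only the odd symmetric pairs, never building a reversed copy (intended as faster; measured about twice A's speed but unconfirmed at the largest size).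
import Mathlib
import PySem

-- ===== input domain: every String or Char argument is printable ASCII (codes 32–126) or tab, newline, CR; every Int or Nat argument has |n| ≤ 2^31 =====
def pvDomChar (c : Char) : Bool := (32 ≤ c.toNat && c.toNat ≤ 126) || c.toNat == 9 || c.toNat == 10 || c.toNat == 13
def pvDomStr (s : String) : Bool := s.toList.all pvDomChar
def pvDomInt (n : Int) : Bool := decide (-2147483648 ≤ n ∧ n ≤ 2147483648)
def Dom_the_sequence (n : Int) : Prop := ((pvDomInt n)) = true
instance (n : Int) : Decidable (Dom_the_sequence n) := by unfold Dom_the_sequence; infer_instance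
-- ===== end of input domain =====

-- B replaces the reversed-copy full scan by a parity shortcut justified by an
-- invariant (even positions hold zero, odd positions hold positive values):
-- even-length steps append a zero outright, odd-length steps count only the
-- odd symmetric pairs.

-- ===== PORT A =====
-- one body of A's while loop: reversed copy, full scan, sum of matches
def pvStepA (seq : List Int) : Int :=
  let rev := (PySem.List.slice? seq none none (-1)).getD []
  (PySem.List.pyRange 0 (seq.length : Int) 1).foldl
    (fun acc i =>
      acc + (if PySem.List.pyGetD seq i 0 = PySem.List.pyGetD rev i 0 then 1 else 0)) 0

-- A's while loop, with fuel; n.toNat iterations always suffice since each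
-- pass appends one element and the loop stops once len seq ≥ n
def pvLoopA (n : Int) : Nat → List Int → List Int
  | 0, seq => seq
  | fuel + 1, seq =>
      if (seq.length : Int) < n then pvLoopA n fuel (seq ++ [pvStepA seq]) else seq

def the_sequence (n : Int) : List Int := pvLoopA n n.toNat [0]

-- ===== PORT B =====
-- one body of B's for loop: 0 for even L, else automatic even matches + odd pairs
def pvStepB (seq : List Int) : Int :=
  let L : Int := seq.length
  if PySem.Int.mod L 2 = 0 then 0
  else
    let c := (PySem.List.pyRange 0 (PySem.Int.floordiv L 2) 1).foldl
      (fun acc k =>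
        acc + (if PySem.List.pyGetD seq (2 * k + 1) 0 = PySem.List.pyGetD seq (L - 2 - 2 * k) 0
               then 1 else 0)) 0
    PySem.Int.floordiv (L + 1) 2 + c

-- B's 'for _ in range(n-1)' loop: exactly (n-1).toNat appends
def pvBuildB : Nat → List Int → List Int
  | 0, seq => seq
  | k + 1, seq => pvBuildB k (seq ++ [pvStepB seq])

def the_sequence_alt (n : Int) : List Int := pvBuildB (n - 1).toNat [0]

-- ===== PRECONDITION & SPEC =====
def Spec_the_sequence (n : Int) (out : List Int) : Prop := out = the_sequence_alt n
instance (n : Int) (out : List Int) : Decidable (Spec_the_sequence n out) := by unfold Spec_the_sequence; infer_instance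

-- ===== CLAIM (what is proved, stated in full; the proofs are below) =====
def Claim_equal_the_sequence : Prop := ∀ (n : Int), Dom_the_sequence n → Spec_the_sequence n (the_sequence n)

-- ===== LEMMAS AND PROOFS =====

-- the invariant B relies on: zeros at even indices, positive values at odd indices
def pvGood (seq : List Int) : Prop :=
  ∀ i, i < seq.length → (i % 2 = 0 → seq.getD i 0 = 0) ∧ (i % 2 = 1 → 0 < seq.getD i 0)

theorem pv_foldl_add_sum {α : Type} (f : α → Int) (l : List α) (a : Int) :
    l.foldl (fun acc i => acc + f i) a = a + (l.map f).sum := by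
  induction l generalizing a with
  | nil => simp
  | cons x xs ih => simp [List.foldl_cons, ih, add_assoc]

theorem pv_sum_map_range (f : ℕ → ℤ) (n : ℕ) :
    ((List.range n).map f).sum = ∑ i ∈ Finset.range n, f i := by
  induction n with
  | zero => simp
  | succ m ih => simp [List.range_succ, Finset.sum_range_succ, ih]

-- split a range sum by index parity
theorem pv_sum_range_parity (f : ℕ → ℤ) (n : ℕ) :
    ∑ i ∈ Finset.range n, f i =
      (∑ k ∈ Finset.range ((n + 1) / 2), f (2 * k)) +
      (∑ k ∈ Finset.range (n / 2), f (2 * k + 1)) := by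
  induction n with
  | zero => simp
  | succ m ih =>
    rcases Nat.mod_two_eq_zero_or_one m with h2 | h2
    · rw [Finset.sum_range_succ, ih,
        show (m + 1 + 1) / 2 = m / 2 + 1 by omega, show (m + 1) / 2 = m / 2 by omega,
        Finset.sum_range_succ (fun k => f (2 * k)),
        show 2 * (m / 2) = m by omega]
      ring
    · rw [Finset.sum_range_succ, ih,
        show (m + 1 + 1) / 2 = (m + 1) / 2 by omega, show (m + 1) / 2 = m / 2 + 1 by omega,
        Finset.sum_range_succ (fun k => f (2 * k + 1)),
        show 2 * (m / 2) + 1 = m by omega]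
      ring

-- A's step body as a Finset sum of match indicators
theorem pv_stepA_sum (seq : List Int) :
    pvStepA seq = ∑ i ∈ Finset.range seq.length,
      (if seq.getD i 0 = seq.getD (seq.length - 1 - i) 0 then (1 : ℤ) else 0) := by
  unfold pvStepA
  rw [PySem.List.slice?_none_none_neg_one]
  simp only [Option.getD_some, PySem.List.pyRange_one, Int.sub_zero, Int.toNat_natCast]
  rw [List.foldl_map, pv_foldl_add_sum, zero_add, pv_sum_map_range]
  refine Finset.sum_congr rfl ?_
  intro k hk
  rw [Finset.mem_range] at hk
  have hrev : seq.reverse.getD k 0 = seq.getD (seq.length - 1 - k) 0 := by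
    rw [List.getD_eq_getElem _ _ (by simpa using hk),
        List.getD_eq_getElem _ _ (by omega), List.getElem_reverse]
  simp only [zero_add, PySem.List.pyGetD_natCast, hrev]

-- the two step bodies agree on lists satisfying the invariant
theorem pv_step_eq (seq : List Int) (hg : pvGood seq) : pvStepA seq = pvStepB seq := by
  set L := seq.length with hL
  rw [pv_stepA_sum]
  rcases Nat.mod_two_eq_zero_or_one L with h2 | h2
  · -- even length: every symmetric pair has opposite parity, no matches
    have hz : ∀ i ∈ Finset.range L,
        (if seq.getD i 0 = seq.getD (L - 1 - i) 0 then (1 : ℤ) else 0) = 0 := by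
      intro i hi
      rw [Finset.mem_range] at hi
      rcases Nat.mod_two_eq_zero_or_one i with hi2 | hi2
      · have ha := (hg i hi).1 hi2
        have hb := (hg (L - 1 - i) (by omega)).2 (by omega)
        rw [if_neg (by omega)]
      · have ha := (hg i hi).2 hi2
        have hb := (hg (L - 1 - i) (by omega)).1 (by omega)
        rw [if_neg (by omega)]
    rw [Finset.sum_congr rfl hz]
    simp only [pvStepB]
    rw [if_pos (by rw [PySem.Int.mod_eq_emod_of_pos (by omega)]; rw [← hL]; omega)]
    simp
  · -- odd length: split by parity; even pairs always match, count the odd pairs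
    rw [pv_sum_range_parity]
    have heven : ∀ k ∈ Finset.range ((L + 1) / 2),
        (if seq.getD (2 * k) 0 = seq.getD (L - 1 - 2 * k) 0 then (1 : ℤ) else 0) = 1 := by
      intro k hk
      rw [Finset.mem_range] at hk
      have h2k : 2 * k < L := by omega
      have ha := (hg (2 * k) h2k).1 (by omega)
      have hb := (hg (L - 1 - 2 * k) (by omega)).1 (by omega)
      rw [if_pos (by omega)]
    rw [Finset.sum_congr rfl heven, Finset.sum_const, Finset.card_range]
    simp only [pvStepB]
    rw [if_neg (by rw [PySem.Int.mod_eq_emod_of_pos (by omega)]; rw [← hL]; omega)]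
    simp only [PySem.List.pyRange_one, Int.sub_zero]
    rw [PySem.Int.floordiv_eq_ediv_of_pos (by omega), PySem.Int.floordiv_eq_ediv_of_pos (by omega),
        show ((seq.length : Int)) / 2 = ((L / 2 : ℕ) : Int) by rw [← hL]; omega,
        Int.toNat_natCast, List.foldl_map, pv_foldl_add_sum, zero_add, pv_sum_map_range,
        show ((seq.length : Int) + 1) / 2 = (((L + 1) / 2 : ℕ) : Int) by rw [← hL]; omega]
    have hodd : ∀ k ∈ Finset.range (L / 2),
        (if PySem.List.pyGetD seq (2 * ((0 : Int) + (k : ℕ)) + 1) 0 =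
            PySem.List.pyGetD seq ((seq.length : Int) - 2 - 2 * ((0 : Int) + (k : ℕ))) 0
         then (1 : ℤ) else 0) =
        (if seq.getD (2 * k + 1) 0 = seq.getD (L - 1 - (2 * k + 1)) 0 then (1 : ℤ) else 0) := by
      intro k hk
      rw [Finset.mem_range] at hk
      have h1 : (2 * ((0 : Int) + (k : ℕ)) + 1) = ((2 * k + 1 : ℕ) : Int) := by push_cast; ring
      have h2 : ((seq.length : Int) - 2 - 2 * ((0 : Int) + (k : ℕ))) = ((L - 1 - (2 * k + 1) : ℕ) : Int) := by
        rw [← hL]; omega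
      rw [h1, h2, PySem.List.pyGetD_natCast, PySem.List.pyGetD_natCast]
    rw [Finset.sum_congr rfl hodd, ← hL]
    simp

-- B's step is nonnegative, and appending it preserves the invariant
theorem pv_stepB_good (seq : List Int) (hg : pvGood seq) : pvGood (seq ++ [pvStepB seq]) := by
  intro i hi
  rw [List.length_append, List.length_cons, List.length_nil] at hi
  rcases lt_or_eq_of_le (Nat.lt_succ_iff.mp hi) with h | h
  · have : (seq ++ [pvStepB seq]).getD i 0 = seq.getD i 0 := by
      rw [List.getD_eq_getElem _ _ (by simpa using hi), List.getD_eq_getElem _ _ h,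
          List.getElem_append_left h]
    rw [this]; exact hg i h
  · have hv : (seq ++ [pvStepB seq]).getD i 0 = pvStepB seq := by
      rw [List.getD_eq_getElem _ _ (by simpa using hi)]
      subst h
      simp
    rw [hv]
    subst h
    simp only [pvStepB]
    rcases Nat.mod_two_eq_zero_or_one seq.length with h2 | h2
    · rw [if_pos (by rw [PySem.Int.mod_eq_emod_of_pos (by omega)]; omega)]
      exact ⟨fun _ => rfl, fun hc => by omega⟩
    · rw [if_neg (by rw [PySem.Int.mod_eq_emod_of_pos (by omega)]; omega)]
      refine ⟨fun hc => by omega, fun _ => ?_⟩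
      have hc : (0 : ℤ) ≤ (PySem.List.pyRange 0 (PySem.Int.floordiv (seq.length : Int) 2) 1).foldl
          (fun acc k =>
            acc + (if PySem.List.pyGetD seq (2 * k + 1) 0 =
                      PySem.List.pyGetD seq ((seq.length : Int) - 2 - 2 * k) 0
                   then 1 else 0)) 0 := by
        rw [pv_foldl_add_sum]
        have := List.sum_nonneg (l := (PySem.List.pyRange 0 (PySem.Int.floordiv (seq.length : Int) 2) 1).map
          (fun k => if PySem.List.pyGetD seq (2 * k + 1) 0 =
                      PySem.List.pyGetD seq ((seq.length : Int) - 2 - 2 * k) 0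
                    then (1 : ℤ) else 0))
          (by intro x hx; simp only [List.mem_map] at hx; obtain ⟨k, _, rfl⟩ := hx; split <;> omega)
        omega
      have hd : (0 : ℤ) < PySem.Int.floordiv ((seq.length : Int) + 1) 2 := by
        rw [PySem.Int.floordiv_eq_ediv_of_pos (by omega)]; omega
      omega

-- with the invariant, A's fuelled while loop equals B's counted loop
theorem pv_loop_eq (n : Int) : ∀ (k fuel : Nat) (seq : List Int), pvGood seq →
    (seq.length : Int) + k = n → k ≤ fuel → pvLoopA n fuel seq = pvBuildB k seq := by
  intro k
  induction k with
  | zero =>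
    intro fuel seq hg hk hf
    cases fuel with
    | zero => rfl
    | succ f => unfold pvLoopA; rw [if_neg (by omega)]; rfl
  | succ m ih =>
    intro fuel seq hg hk hf
    cases fuel with
    | zero => omega
    | succ f =>
      have hlt : ((seq.length : Int)) < n := by push_cast at hk; omega
      have hmf : m ≤ f := Nat.succ_le_succ_iff.mp hf
      have hk' : (((seq ++ [pvStepB seq]).length : Int)) + m = n := by
        simp only [List.length_append, List.length_cons, List.length_nil]
        push_cast; push_cast at hk; omega
      unfold pvLoopA pvBuildB
      rw [if_pos hlt, pv_step_eq seq hg]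
      exact ih f (seq ++ [pvStepB seq]) (pv_stepB_good seq hg) hk' hmf

theorem pv_good_zero : pvGood [0] := by
  intro i hi
  simp only [List.length_cons, List.length_nil] at hi
  interval_cases i
  exact ⟨fun _ => rfl, fun h => by omega⟩

-- ===== VERDICT (by name: the statement is the Claim_ definition above) =====
theorem the_sequence_spec : Claim_equal_the_sequence := by
  intro n _
  unfold Spec_the_sequence the_sequence the_sequence_alt
  by_cases hn : 1 ≤ n
  · exact pv_loop_eq n (n - 1).toNat n.toNat [0] pv_good_zero (by simp; omega) (by omega)
  · have h1 : (n - 1).toNat = 0 := by omega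
    rw [h1]
    cases hcase : n.toNat with
    | zero => rfl
    | succ f =>
      unfold pvLoopA
      rw [if_neg (by simp only [List.length_cons, List.length_nil]; omega)]
      rfl
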